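-- pv_equiv track=rewrite | github.com/Mervin-Jar/leetcode | appendcharacters.py | appendcharacter
-- ===== SOURCE A (Python) =====
-- def appendcharacter(s: str, t: str) -> int:
--     s_indx, t_indx =0,0
--     s_ln, t_ln = len(s), len(t)
--
--     while s_indx < s_ln and t_indx < t_ln:
--         if s[s_indx] ==  t[t_indx]:
--             t_indx += 1
--         s_indx += 1
--     return len(t[t_indx:])
-- ===== SOURCE B (Python) =====
-- def appendcharacter(s: str, t: str) -> int:
--     # Index every character's occurrence positions in s once, then walk t,
--     # jumping to the next usable occurrence with a binary search (lower bound).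
--     pos = {}
--     for ch, i in zip(s, range(len(s))):
--         pos[ch] = pos.get(ch, []) + [i]
--     cur = 0
--     k = 0
--     for ch in t:
--         lst = pos.get(ch, [])
--         lo, hi = 0, len(lst)
--         while lo < hi:
--             mid = (lo + hi) // 2
--             if lst[mid] < cur:
--                 lo = mid + 1
--             else:
--                 hi = mid
--         if lo == len(lst):
--             return len(t) - k
--         cur = lst[lo] + 1
--         k += 1
--     return 0
-- ===== Notes on version B (the rewrite author's own statement) =====
-- stated objective: alternative
-- what changed: Instead of A's single greedy two-pointer scan of s against t, B first builds a per-character index of occurrence positions in s (one pass over s), then walks t jumping from occurrence to occurrence via a hand-written lower-bound binary search over the position list; the inner scan of s disappears.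
import Mathlib
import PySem

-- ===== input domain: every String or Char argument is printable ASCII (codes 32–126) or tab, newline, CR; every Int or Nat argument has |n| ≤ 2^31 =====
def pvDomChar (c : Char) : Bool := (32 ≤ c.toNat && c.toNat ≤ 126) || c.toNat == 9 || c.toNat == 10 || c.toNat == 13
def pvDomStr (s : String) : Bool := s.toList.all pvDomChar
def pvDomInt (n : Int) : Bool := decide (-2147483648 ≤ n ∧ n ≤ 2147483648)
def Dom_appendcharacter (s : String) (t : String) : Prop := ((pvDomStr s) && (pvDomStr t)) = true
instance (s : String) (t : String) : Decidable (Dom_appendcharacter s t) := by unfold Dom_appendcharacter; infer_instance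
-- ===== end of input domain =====

-- B replaces A's single greedy two-pointer scan by a per-character position index of s built
-- once, then a walk over t that jumps to the next usable occurrence via a hand-written
-- lower-bound binary search (alternative algorithm); equivalence proved on all inputs.


-- ===== PORT A =====
-- A's while loop: advance s_indx each step, advance t_indx on a character match; returns the final t_indx.
def appendAuxA (sl tl : List Char) (sIdx tIdx : Nat) : Nat :=
  if h : sIdx < sl.length ∧ tIdx < tl.length then
    if sl.getD sIdx ' ' = tl.getD tIdx ' ' then
      appendAuxA sl tl (sIdx + 1) (tIdx + 1)
    else
      appendAuxA sl tl (sIdx + 1) tIdx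
  else tIdx
termination_by sl.length - sIdx
decreasing_by all_goals omega

-- return len(t[t_indx:]) : with t_indx ≥ 0 the slice t[t_indx:] is exactly List.drop t_indx
def appendcharacter (s : String) (t : String) : Int :=
  let tIdx := appendAuxA s.toList t.toList 0 0
  ((t.toList.drop tIdx).length : Int)

-- ===== PORT B =====
-- pos[ch] = pos.get(ch, []) + [i]  over  zip(s, range(len(s)))
def buildPos (sl : List Char) : PySem.Dict Char (List Int) :=
  (sl.zip (PySem.List.pyRange 0 (PySem.List.len sl) 1)).foldl
    (fun d p => d.modify p.1 [] (· ++ [p.2])) PySem.Dict.empty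

-- the while loop: lower-bound binary search, first index lo with lst[lo] >= cur
def bs (lst : List Int) (cur : Int) (lo hi : Nat) : Nat :=
  if h : lo < hi then
    let mid := (lo + hi) / 2
    if lst.getD mid 0 < cur then bs lst cur (mid + 1) hi else bs lst cur lo mid
  else lo
termination_by hi - lo
decreasing_by all_goals omega

-- the for loop over t, carrying the match counter k and the next usable s-position cur
def loopB (pos : PySem.Dict Char (List Int)) (tlen : Nat) : List Char → Nat → Int → Int
  | [], _, _ => 0
  | ch :: rest, k, cur =>
    let lst := pos.getD ch []
    let lo := bs lst cur 0 lst.length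
    if lo = lst.length then (tlen : Int) - (k : Int)
    else loopB pos tlen rest (k + 1) (lst.getD lo 0 + 1)

def appendcharacter_alt (s : String) (t : String) : Int :=
  loopB (buildPos s.toList) t.toList.length t.toList 0 0

-- ===== PRECONDITION & SPEC =====
def Spec_appendcharacter (s : String) (t : String) (out : Int) : Prop := out = appendcharacter_alt s t
instance (s : String) (t : String) (out : Int) : Decidable (Spec_appendcharacter s t out) := by unfold Spec_appendcharacter; infer_instance

-- ===== CLAIM (what is proved, stated in full; the proofs are below) =====
def Claim_equal_appendcharacter : Prop := ∀ (s : String) (t : String), Dom_appendcharacter s t → Spec_appendcharacter s t (appendcharacter s t)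

-- ===== LEMMAS AND PROOFS =====

-- list-level form of A's greedy match counter
def greedy : List Char → List Char → Nat
  | [], _ => 0
  | _ :: _, [] => 0
  | x :: xs, c :: cs => if x = c then 1 + greedy xs cs else greedy xs (c :: cs)

-- 'c in it' consumption: drop everything of the list up to and including the first c
def drain (c : Char) : List Char → Option (List Char)
  | [] => none
  | x :: xs => if x = c then some xs else drain c xs

-- the occurrence positions of c in a list, counted from offset n
def idxsFrom (c : Char) : List Char → Int → List Int
  | [], _ => []
  | x :: xs, n => if x = c then n :: idxsFrom c xs (n + 1) else idxsFrom c xs (n + 1)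

theorem greedy_le (sl tl : List Char) : greedy sl tl ≤ tl.length := by
  induction sl generalizing tl with
  | nil => simp [greedy]
  | cons x xs ih =>
    cases tl with
    | nil => simp [greedy]
    | cons c cs =>
      simp only [greedy]
      split
      · have := ih cs; simp; omega
      · have := ih (c :: cs); simpa using this

theorem greedy_nil_right (sl : List Char) : greedy sl [] = 0 := by
  cases sl <;> rfl

theorem greedy_drain (sl : List Char) (c : Char) (cs : List Char) :
    greedy sl (c :: cs) = match drain c sl with
      | some rest => 1 + greedy rest cs
      | none => 0 := by
  induction sl generalizing c cs with
  | nil => simp [greedy, drain]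
  | cons x xs ih =>
    by_cases h : x = c
    · simp [greedy, drain, h]
    · simp [greedy, drain, h, ih]

theorem appendAuxA_eq (sl tl : List Char) (sIdx tIdx : Nat)
    (hs : sIdx ≤ sl.length) (ht : tIdx ≤ tl.length) :
    appendAuxA sl tl sIdx tIdx = tIdx + greedy (sl.drop sIdx) (tl.drop tIdx) := by
  by_cases h : sIdx < sl.length ∧ tIdx < tl.length
  · obtain ⟨h1, h2⟩ := h
    have hdS : sl.drop sIdx = sl[sIdx] :: sl.drop (sIdx + 1) := List.drop_eq_getElem_cons h1
    have hdT : tl.drop tIdx = tl[tIdx] :: tl.drop (tIdx + 1) := List.drop_eq_getElem_cons h2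
    have hgS : sl.getD sIdx ' ' = sl[sIdx] := List.getD_eq_getElem sl ' ' h1
    have hgT : tl.getD tIdx ' ' = tl[tIdx] := List.getD_eq_getElem tl ' ' h2
    rw [appendAuxA]
    simp only [h1, h2, and_self, dite_true, hgS, hgT]
    by_cases he : sl[sIdx] = tl[tIdx]
    · rw [if_pos he, appendAuxA_eq sl tl (sIdx+1) (tIdx+1) (by omega) (by omega),
        hdS, hdT, greedy, if_pos he]
      omega
    · rw [if_neg he, appendAuxA_eq sl tl (sIdx+1) tIdx (by omega) ht, hdS, hdT, greedy,
        if_neg he, ← hdT]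
  · rw [appendAuxA, dif_neg h]
    rcases not_and_or.mp h with h' | h'
    · have : sl.drop sIdx = [] := List.drop_eq_nil_of_le (by omega)
      simp [this, greedy]
    · have : tl.drop tIdx = [] := List.drop_eq_nil_of_le (by omega)
      rw [this, greedy_nil_right]
      omega
termination_by sl.length - sIdx
decreasing_by all_goals omega

-- zip(s, range(a, a+len(s))) filtered to c and projected to the index = idxsFrom c s a
theorem zip_range_filter (c : Char) (sl : List Char) (a : Int) :
    (((sl.zip (PySem.List.pyRange a (a + sl.length) 1)).filter
        (fun p => p.1 == c)).map (·.2)) = idxsFrom c sl a := by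
  induction sl generalizing a with
  | nil => simp [idxsFrom]
  | cons x xs ih =>
    have hb : a + ((x :: xs).length : Int) = (a + 1) + (xs.length : Int) := by
      push_cast [List.length_cons]; ring
    rw [hb, PySem.List.pyRange_one_cons (by omega),
      List.zip_cons_cons, List.filter_cons]
    by_cases h : x = c
    · simpa [idxsFrom, h] using ih (a + 1)
    · simpa [idxsFrom, h] using ih (a + 1)

theorem buildPos_getD (sl : List Char) (c : Char) :
    (buildPos sl).getD c [] = idxsFrom c sl 0 := by
  unfold buildPos
  rw [PySem.Dict.getD_foldl_modify_append, PySem.Dict.getD_empty]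
  simpa using zip_range_filter c sl 0

theorem idxsFrom_ge (c : Char) (sl : List Char) (n : Int) :
    ∀ x ∈ idxsFrom c sl n, n ≤ x := by
  induction sl generalizing n with
  | nil => simp [idxsFrom]
  | cons y ys ih =>
    intro x hx
    simp only [idxsFrom] at hx
    split at hx
    · rcases List.mem_cons.mp hx with rfl | hx
      · omega
      · have := ih (n + 1) x hx; omega
    · have := ih (n + 1) x hx; omega

theorem idxsFrom_pairwise (c : Char) (sl : List Char) (n : Int) :
    (idxsFrom c sl n).Pairwise (· < ·) := by
  induction sl generalizing n with
  | nil => simp [idxsFrom]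
  | cons y ys ih =>
    simp only [idxsFrom]
    split
    · exact List.Pairwise.cons (fun x hx => by have := idxsFrom_ge c ys (n + 1) x hx; omega) (ih (n + 1))
    · exact ih (n + 1)

theorem dropWhile_of_ge (cur : Int) (l : List Int) (h : ∀ x ∈ l, cur ≤ x) :
    l.dropWhile (fun x => decide (x < cur)) = l := by
  cases l with
  | nil => rfl
  | cons x xs =>
    have hx := h x (List.mem_cons_self)
    have hx' : ¬ x < cur := by omega
    simp [hx']

theorem idxsFrom_dropWhile (c : Char) (sl : List Char) (n cur : Int) (h : n ≤ cur) :
    (idxsFrom c sl n).dropWhile (fun x => decide (x < cur))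
      = idxsFrom c (sl.drop (cur - n).toNat) cur := by
  induction sl generalizing n with
  | nil => simp [idxsFrom]
  | cons x xs ih =>
    by_cases he : n = cur
    · subst he
      have h0 : (n - n).toNat = 0 := by omega
      rw [h0, List.drop_zero]
      exact dropWhile_of_ge n _ (idxsFrom_ge c (x :: xs) n)
    · have hlt : n < cur := by omega
      have hd : ((cur - n).toNat) = (cur - (n + 1)).toNat + 1 := by omega
      have hstep : (x :: xs).drop (cur - n).toNat = xs.drop (cur - (n + 1)).toNat := by
        rw [hd]; rfl
      rw [hstep]
      by_cases hc : x = c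
      · simp only [idxsFrom, if_pos hc, List.dropWhile_cons]
        simp [hlt, ih (n + 1) (by omega)]
      · simp only [idxsFrom, if_neg hc]
        exact ih (n + 1) (by omega)

theorem idxsFrom_nil_drain (c : Char) (l : List Char) (m : Int)
    (h : idxsFrom c l m = []) : drain c l = none := by
  induction l generalizing m with
  | nil => rfl
  | cons x xs ih =>
    simp only [idxsFrom] at h
    split at h
    · exact absurd h (by simp)
    · have hc : x ≠ c := by
        by_contra hc; simp [hc] at *
      simp [drain, hc, ih (m + 1) h]

theorem idxsFrom_cons_drain (c : Char) (l : List Char) (m p : Int) (ps : List Int)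
    (h : idxsFrom c l m = p :: ps) :
    m ≤ p ∧ drain c l = some (l.drop (p - m + 1).toNat) := by
  induction l generalizing m with
  | nil => simp [idxsFrom] at h
  | cons x xs ih =>
    simp only [idxsFrom] at h
    by_cases hc : x = c
    · rw [if_pos hc] at h
      obtain ⟨h1, -⟩ := List.cons_eq_cons.mp h
      subst h1
      refine ⟨le_refl _, ?_⟩
      have h1 : (m - m + 1).toNat = 1 := by omega
      rw [h1]
      simp [drain, hc]
    · rw [if_neg hc] at h
      obtain ⟨h1, h2⟩ := ih (m + 1) h
      refine ⟨by omega, ?_⟩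
      have : (p - m + 1).toNat = (p - (m + 1) + 1).toNat + 1 := by omega
      simp [drain, hc, h2, this]

-- lower-bound binary search: on a list characterized by ℓ it returns ℓ
theorem bs_eq (lst : List Int) (cur : Int) (lo hi ℓ : Nat)
    (hlo : lo ≤ ℓ) (hhi : ℓ ≤ hi) (hlen : hi ≤ lst.length)
    (H : ∀ j, j < lst.length → (lst.getD j 0 < cur ↔ j < ℓ)) :
    bs lst cur lo hi = ℓ := by
  by_cases h : lo < hi
  · rw [bs, dif_pos h]
    set mid := (lo + hi) / 2 with hmid
    have hm1 : lo ≤ mid := by omega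
    have hm2 : mid < hi := by omega
    by_cases hc : lst.getD mid 0 < cur
    · have : mid < ℓ := (H mid (by omega)).mp hc
      rw [if_pos hc]
      exact bs_eq lst cur (mid + 1) hi ℓ (by omega) hhi hlen H
    · have : ¬ mid < ℓ := fun hlt => hc ((H mid (by omega)).mpr hlt)
      rw [if_neg hc]
      exact bs_eq lst cur lo mid ℓ hlo (by omega) (by omega) H
  · rw [bs, dif_neg h]; omega
termination_by hi - lo
decreasing_by all_goals omega

-- on a strictly sorted list the lower bound is the takeWhile length
theorem sorted_lb (lst : List Int) (cur : Int) (hp : lst.Pairwise (· < ·)) :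
    ∀ j, j < lst.length →
      (lst.getD j 0 < cur ↔ j < (lst.takeWhile (fun x => decide (x < cur))).length) := by
  induction lst with
  | nil => simp
  | cons x xs ih =>
    obtain ⟨hx, hxs⟩ := List.pairwise_cons.mp hp
    intro j hj
    by_cases hc : x < cur
    · rw [List.takeWhile_cons_of_pos (by simpa using hc)]
      cases j with
      | zero => simpa using hc
      | succ j =>
        simp only [List.length_cons, List.getD_cons_succ]
        rw [ih hxs j (by simpa using hj)]
        omega
    · rw [List.takeWhile_cons_of_neg (by simpa using hc)]
      simp only [List.length_nil]
      constructor
      · intro hlt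
        exfalso
        cases j with
        | zero => simp at hlt; omega
        | succ j =>
          simp only [List.getD_cons_succ] at hlt
          have hjlen : j < xs.length := by simpa using hj
          have hmem : xs.getD j 0 ∈ xs := by
            rw [List.getD_eq_getElem _ _ hjlen]
            exact List.getElem_mem hjlen
          have := hx _ hmem
          omega
      · omega

theorem drop_takeWhile (lst : List Int) (p : Int → Bool) :
    lst.drop (lst.takeWhile p).length = lst.dropWhile p := by
  induction lst with
  | nil => rfl
  | cons x xs ih =>
    by_cases h : p x
    · simp [List.takeWhile_cons_of_pos h, List.dropWhile_cons_of_pos h, ih]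
    · simp [List.takeWhile_cons_of_neg h, List.dropWhile_cons_of_neg h]

-- the main loop invariant: loopB computes tlen - k - (greedy matches of tl against s from cur)
theorem loopB_eq (sl : List Char) (tlen : Nat) (tl : List Char) (k cur : Nat)
    (hlen : tlen = k + tl.length) :
    loopB (buildPos sl) tlen tl k (cur : Int)
      = (tlen : Int) - k - greedy (sl.drop cur) tl := by
  induction tl generalizing k cur with
  | nil =>
    simp only [List.length_nil, Nat.add_zero] at hlen
    subst hlen
    simp [loopB, greedy_nil_right]
  | cons ch rest ih =>
    rw [loopB]
    have hbp := buildPos_getD sl ch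
    set lst := (buildPos sl).getD ch [] with hlst
    set ℓ := (lst.takeWhile (fun x => decide (x < (cur : Int)))).length with hℓ
    have hℓle : ℓ ≤ lst.length := by
      have := congrArg List.length
        (List.takeWhile_append_dropWhile (p := fun x => decide (x < (cur : Int))) (l := lst))
      simp only [List.length_append] at this
      omega
    have hbs : bs lst (cur : Int) 0 lst.length = ℓ :=
      bs_eq lst _ 0 lst.length ℓ (Nat.zero_le _) hℓle le_rfl
        (sorted_lb lst _ (hbp ▸ idxsFrom_pairwise ch sl 0))
    have hdw : lst.dropWhile (fun x => decide (x < (cur : Int)))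
        = idxsFrom ch (sl.drop cur) (cur : Int) := by
      rw [hbp]
      have := idxsFrom_dropWhile ch sl 0 (cur : Int) (by omega)
      simpa using this
    have hdrop : lst.drop ℓ = idxsFrom ch (sl.drop cur) (cur : Int) := by
      rw [hℓ, drop_takeWhile, hdw]
    rw [hbs]
    by_cases hend : ℓ = lst.length
    · rw [if_pos hend]
      have hnil : idxsFrom ch (sl.drop cur) (cur : Int) = [] := by
        rw [← hdrop, List.drop_eq_nil_of_le (by omega)]
      have hdr : drain ch (sl.drop cur) = none := idxsFrom_nil_drain _ _ _ hnil
      rw [greedy_drain, hdr]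
      push_cast
      ring
    · rw [if_neg hend]
      have hne : lst.drop ℓ ≠ [] := by
        intro hc
        have := List.drop_eq_nil_iff.mp hc
        omega
      obtain ⟨p, ps, hps⟩ := List.exists_cons_of_ne_nil hne
      have hidx : idxsFrom ch (sl.drop cur) (cur : Int) = p :: ps := hdrop ▸ hps
      obtain ⟨hple, hdr⟩ := idxsFrom_cons_drain ch (sl.drop cur) (cur : Int) p ps hidx
      have hgetD : lst.getD ℓ 0 = p := by
        have : lst.getD ℓ 0 = (lst.drop ℓ).getD 0 0 := by
          rw [List.getD_eq_getElem?_getD, List.getD_eq_getElem?_getD,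
            List.getElem?_drop, Nat.add_zero]
        rw [this, hps]; rfl
      have hp0 : 0 ≤ p := by
        have := idxsFrom_ge ch (sl.drop cur) (cur : Int) p (hidx ▸ List.mem_cons_self)
        omega
      have hdd : (sl.drop cur).drop (p - (cur : Int) + 1).toNat = sl.drop (p.toNat + 1) := by
        rw [List.drop_drop]
        congr 1
        omega
      rw [greedy_drain, hdr, hdd, hgetD]
      have hcast : (p + 1 : Int) = ((p.toNat + 1 : Nat) : Int) := by omega
      rw [hcast, ih (k + 1) (p.toNat + 1) (by simp at hlen ⊢; omega)]
      push_cast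
      ring

-- ===== VERDICT (by name: the statement is the Claim_ definition above) =====
theorem appendcharacter_spec : Claim_equal_appendcharacter := by
  intro s t _
  unfold Spec_appendcharacter appendcharacter appendcharacter_alt
  have hA := appendAuxA_eq s.toList t.toList 0 0 (Nat.zero_le _) (Nat.zero_le _)
  simp only [List.drop_zero, Nat.zero_add] at hA
  have hB := loopB_eq s.toList t.toList.length t.toList 0 0 (by simp)
  simp only [List.drop_zero, Nat.cast_zero] at hB
  have hle := greedy_le s.toList t.toList
  simp only [hA, List.length_drop, hB]
  omega
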